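-- pv_equiv track=rewrite | github.com/all-day-and-night/algorithms | programmers/cntRoom.py | solution
-- ===== SOURCE A (Python) =====
-- from collections import defaultdict, deque
--
-- def solution(arrows):
--     answer = 0
--     dx = [-1, -1, 0, 1, 1, 1, 0, -1]
--     dy = [0, 1, 1, 1, 0, -1, -1, -1]
--
--     x, y = 0, 0
--     visited = defaultdict(int)
--     visited_dir = defaultdict(int)
--
--     q = deque()
--     q.append((x, y))
--     for i in arrows:
--         for _ in range(2):
--             nx, ny = x + dx[i], y + dy[i]
--             q.append([nx, ny])
--             x, y = nx, ny
--
--     x, y = q.popleft()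
--     visited[(x, y)] = 1
--     cnt = 0
--     while q:
--         nx, ny = q.popleft()
--
--         if visited[(nx, ny)] == 1:
--             if visited_dir[((x, y), (nx, ny))] == 0:
--                 cnt += 1
--         else:
--             visited[(nx, ny)] = 1
--
--         visited_dir[((x, y), (nx, ny))] = 1
--         visited_dir[((nx, ny), (x, y))] = 1
--         x, y = nx, ny
--
--     return cnt
-- ===== SOURCE B (Python) =====
-- def solution(arrows):
--     dx = [-1, -1, 0, 1, 1, 1, 0, -1]
--     dy = [0, 1, 1, 1, 0, -1, -1, -1]
--     x, y = 0, 0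
--     verts = {(0, 0)}
--     edges = set()
--     for i in arrows:
--         for _ in range(2):
--             nx, ny = x + dx[i], y + dy[i]
--             verts.add((nx, ny))
--             e = ((x, y), (nx, ny)) if (x, y) <= (nx, ny) else ((nx, ny), (x, y))
--             edges.add(e)
--             x, y = nx, ny
--     return len(edges) - len(verts) + 1
-- ===== Notes on version B (the rewrite author's own statement) =====
-- stated objective: alternative
-- what changed: A counts rooms incrementally with visited-vertex and visited-directed-edge dicts during the walk; B just collects the vertex set and undirected-edge set of the same doubled walk and returns len(edges) - len(verts) + 1 (Euler's formula for the bounded faces of the connected walk graph).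
import Mathlib
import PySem

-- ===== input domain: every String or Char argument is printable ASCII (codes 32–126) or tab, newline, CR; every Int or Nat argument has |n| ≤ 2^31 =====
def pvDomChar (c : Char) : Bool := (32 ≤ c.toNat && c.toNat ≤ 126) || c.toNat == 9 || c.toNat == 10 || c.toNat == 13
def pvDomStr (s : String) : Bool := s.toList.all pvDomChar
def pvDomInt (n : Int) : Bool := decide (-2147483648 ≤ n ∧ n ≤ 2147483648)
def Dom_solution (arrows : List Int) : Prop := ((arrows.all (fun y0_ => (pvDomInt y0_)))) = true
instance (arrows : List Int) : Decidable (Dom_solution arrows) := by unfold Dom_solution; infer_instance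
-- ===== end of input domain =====

-- B replaces A's incremental room counting (dicts of visited vertices and directed edges, counting
-- each re-visit over a fresh edge) by collecting the vertex set and undirected-edge set of the same
-- doubled walk and returning |E| - |V| + 1 (Euler's formula for bounded faces of a connected plane walk).

-- ===== PORT A =====
def pvDx : List Int := [-1, -1, 0, 1, 1, 1, 0, -1]
def pvDy : List Int := [0, 1, 1, 1, 0, -1, -1, -1]

-- first loop of A: extend the queue by two unit steps per arrow (state: queue, current point)
def pvBuildStep (st : List (Int × Int) × (Int × Int)) (i : Int) : List (Int × Int) × (Int × Int) :=
  (List.range 2).foldl (fun st _ =>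
    let nx := st.2.1 + PySem.List.pyGetD pvDx i 0
    let ny := st.2.2 + PySem.List.pyGetD pvDy i 0
    (st.1 ++ [(nx, ny)], (nx, ny))) st

-- second loop of A: state (current point, visited, visited_dir, cnt)
def pvWalkStep
    (st : (Int × Int) × PySem.Dict (Int × Int) Int × PySem.Dict ((Int × Int) × (Int × Int)) Int × Int)
    (np : Int × Int) :
    (Int × Int) × PySem.Dict (Int × Int) Int × PySem.Dict ((Int × Int) × (Int × Int)) Int × Int :=
  let cur := st.1
  let vis := st.2.1
  let vdir := st.2.2.1
  let cnt := st.2.2.2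
  let cnt' := if vis.getD np 0 = 1 then (if vdir.getD (cur, np) 0 = 0 then cnt + 1 else cnt) else cnt
  let vis' := if vis.getD np 0 = 1 then vis else vis.insert np 1
  let vdir' := (vdir.insert (cur, np) 1).insert (np, cur) 1
  (np, vis', vdir', cnt')

def solution (arrows : List Int) : Int :=
  let b := arrows.foldl pvBuildStep ([((0 : Int), (0 : Int))], ((0 : Int), (0 : Int)))
  match b.1 with
  | [] => 0   -- unreachable: the queue starts with (0,0) and only grows
  | p0 :: rest =>
    (rest.foldl pvWalkStep
      (p0, (PySem.Dict.empty).insert p0 (1 : Int),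
       (PySem.Dict.empty : PySem.Dict ((Int × Int) × (Int × Int)) Int), (0 : Int))).2.2.2

-- ===== PORT B =====
-- Python's tuple '<=' on pairs (lexicographic)
def pvLexLE (a b : Int × Int) : Bool := decide (a.1 < b.1 ∨ (a.1 = b.1 ∧ a.2 ≤ b.2))

-- the sorted unordered edge, as B builds it
def pvCanon (a b : Int × Int) : (Int × Int) × (Int × Int) :=
  if pvLexLE a b then (a, b) else (b, a)

-- B's loop body: state (current point, vertex set, undirected-edge set)
def pvAltStep
    (st : (Int × Int) × PySem.Set (Int × Int) × PySem.Set ((Int × Int) × (Int × Int)))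
    (i : Int) :
    (Int × Int) × PySem.Set (Int × Int) × PySem.Set ((Int × Int) × (Int × Int)) :=
  (List.range 2).foldl (fun st _ =>
    let np := (st.1.1 + PySem.List.pyGetD pvDx i 0, st.1.2 + PySem.List.pyGetD pvDy i 0)
    (np, PySem.Set.add st.2.1 np, PySem.Set.add st.2.2 (pvCanon st.1 np))) st

def solution_alt (arrows : List Int) : Int :=
  let st := arrows.foldl pvAltStep
    (((0 : Int), (0 : Int)), PySem.Set.ofList [((0 : Int), (0 : Int))],
     (PySem.Set.empty : PySem.Set ((Int × Int) × (Int × Int))))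
  (st.2.2.length : Int) - (st.2.1.length : Int) + 1

-- ===== PRECONDITION & SPEC =====
-- Pre_ excludes exactly the inputs on which Python raises IndexError: an arrow outside [-8, 8)
-- is an invalid index into the length-8 dx/dy tables in both A and B.
def Pre_solution (arrows : List Int) : Prop := ∀ i ∈ arrows, -8 ≤ i ∧ i < 8
instance (arrows : List Int) : Decidable (Pre_solution arrows) := by unfold Pre_solution; infer_instance

def pvWitness_solution : List Int := [6, 6, 6, 4, 4, 4, 2, 2, 2, 0, 0, 0, 1, 6, 5, 5, 3, 2, 4, 1]

def Spec_solution (arrows : List Int) (out : Int) : Prop := out = solution_alt arrows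
instance (arrows : List Int) (out : Int) : Decidable (Spec_solution arrows out) := by unfold Spec_solution; infer_instance

-- ===== CLAIM (what is proved, stated in full; the proofs are below) =====
def Claim_equal_solution : Prop := ∀ (arrows : List Int), Dom_solution arrows → Pre_solution arrows → Spec_solution arrows (solution arrows)

-- ===== LEMMAS AND PROOFS =====

-- the unit step taken for arrow i
def pvNext (p : Int × Int) (i : Int) : Int × Int :=
  (p.1 + PySem.List.pyGetD pvDx i 0, p.2 + PySem.List.pyGetD pvDy i 0)

-- the points visited after p by the doubled walk
def pvPath (p : Int × Int) : List Int → List (Int × Int)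
  | [] => []
  | i :: is =>
      pvNext p i :: pvNext (pvNext p i) i :: pvPath (pvNext (pvNext p i) i) is

def pvEnd (p : Int × Int) : List Int → (Int × Int)
  | [] => p
  | i :: is => pvEnd (pvNext (pvNext p i) i) is

-- B's step expressed per visited point
def pvStepV
    (st : (Int × Int) × PySem.Set (Int × Int) × PySem.Set ((Int × Int) × (Int × Int)))
    (q : Int × Int) :
    (Int × Int) × PySem.Set (Int × Int) × PySem.Set ((Int × Int) × (Int × Int)) :=
  (q, PySem.Set.add st.2.1 q, PySem.Set.add st.2.2 (pvCanon st.1 q))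

theorem pvRange2 : List.range 2 = [0, 1] := by decide

theorem pvBuild_eq (arrows : List Int) : ∀ (q0 : List (Int × Int)) (p : Int × Int),
    arrows.foldl pvBuildStep (q0, p) = (q0 ++ pvPath p arrows, pvEnd p arrows) := by
  induction arrows with
  | nil => intro q0 p; simp [pvPath, pvEnd]
  | cons i is ih =>
    intro q0 p
    have hb : pvBuildStep (q0, p) i
        = (q0 ++ [pvNext p i, pvNext (pvNext p i) i], pvNext (pvNext p i) i) := by
      simp [pvBuildStep, pvRange2, pvNext]
    rw [List.foldl_cons, hb, ih]
    simp [pvPath, pvEnd]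
theorem pvAlt_eq (arrows : List Int) :
    ∀ (st : (Int × Int) × PySem.Set (Int × Int) × PySem.Set ((Int × Int) × (Int × Int))),
    arrows.foldl pvAltStep st = (pvPath st.1 arrows).foldl pvStepV st := by
  induction arrows with
  | nil => intro st; simp [pvPath]
  | cons i is ih =>
    intro st
    have hb : pvAltStep st i
        = pvStepV (pvStepV st (pvNext st.1 i)) (pvNext (pvNext st.1 i) i) := by
      simp [pvAltStep, pvStepV, pvRange2, pvNext]
    rw [List.foldl_cons, hb, ih]
    simp [pvPath, pvStepV]
theorem pvCanon_cases (a b : Int × Int) : pvCanon a b = (a, b) ∨ pvCanon a b = (b, a) := by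
  unfold pvCanon; split_ifs <;> simp

theorem pvCanon_comm (a b : Int × Int) : pvCanon a b = pvCanon b a := by
  obtain ⟨a1, a2⟩ := a; obtain ⟨b1, b2⟩ := b
  unfold pvCanon pvLexLE
  split_ifs with h1 h2 h2 <;> simp_all [Prod.ext_iff] <;> omega
theorem pvCanon_eq_iff (a b c d : Int × Int) :
    pvCanon a b = pvCanon c d ↔ (a = c ∧ b = d) ∨ (a = d ∧ b = c) := by
  constructor
  · intro h
    rcases pvCanon_cases a b with h1 | h1 <;> rcases pvCanon_cases c d with h2 | h2 <;>
      rw [h1, h2] at h <;> simp [Prod.ext_iff] at h <;> simp [Prod.ext_iff] <;> tauto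
  · rintro (⟨rfl, rfl⟩ | ⟨rfl, rfl⟩)
    · rfl
    · exact pvCanon_comm a b
theorem pvDirInv (vdir : PySem.Dict ((Int × Int) × (Int × Int)) Int)
    (edges : PySem.Set ((Int × Int) × (Int × Int))) (cur p : Int × Int)
    (hdir : ∀ a b, vdir.getD (a, b) 0 = if pvCanon a b ∈ edges then 1 else 0) :
    ∀ a b, (((vdir.insert (cur, p) 1).insert (p, cur) 1)).getD (a, b) 0
      = if pvCanon a b ∈ PySem.Set.add edges (pvCanon cur p) then 1 else 0 := by
  intro a b
  rw [PySem.Dict.getD_insert, PySem.Dict.getD_insert, hdir]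
  by_cases hm : pvCanon a b = pvCanon cur p
  · have hmem : pvCanon a b ∈ PySem.Set.add edges (pvCanon cur p) := by
      rw [PySem.Set.mem_add]; exact Or.inr hm
    rcases (pvCanon_eq_iff a b cur p).1 hm with ⟨rfl, rfl⟩ | ⟨rfl, rfl⟩ <;> simp [hmem]
  · have h1 : (a, b) ≠ ((p, cur) : (Int × Int) × (Int × Int)) := by
      rintro h
      rw [Prod.mk.injEq] at h
      obtain ⟨rfl, rfl⟩ := h
      exact hm (pvCanon_comm _ _)
    have h2 : (a, b) ≠ ((cur, p) : (Int × Int) × (Int × Int)) := by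
      rintro h
      rw [Prod.mk.injEq] at h
      obtain ⟨rfl, rfl⟩ := h
      exact hm rfl
    rw [if_neg h1, if_neg h2]
    have hiff : (pvCanon a b ∈ PySem.Set.add edges (pvCanon cur p)) ↔ pvCanon a b ∈ edges := by
      simp [PySem.Set.mem_add, hm]
    simp [hiff]

theorem pvEndsInv (edges : PySem.Set ((Int × Int) × (Int × Int)))
    (verts : PySem.Set (Int × Int)) (cur p : Int × Int) (hcur : cur ∈ verts)
    (hends : ∀ e ∈ edges, e.1 ∈ verts ∧ e.2 ∈ verts) :
    ∀ e ∈ PySem.Set.add edges (pvCanon cur p),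
      e.1 ∈ PySem.Set.add verts p ∧ e.2 ∈ PySem.Set.add verts p := by
  intro e he
  rw [PySem.Set.mem_add] at he
  rcases he with he | rfl
  · exact ⟨(PySem.Set.mem_add _ _ _).2 (Or.inl (hends e he).1),
           (PySem.Set.mem_add _ _ _).2 (Or.inl (hends e he).2)⟩
  · rcases pvCanon_cases cur p with h | h <;> rw [h] <;>
      exact ⟨by simp [PySem.Set.mem_add, hcur], by simp [PySem.Set.mem_add, hcur]⟩

theorem pvWalk_eq : ∀ (ps : List (Int × Int)) (cur : Int × Int)
    (vis : PySem.Dict (Int × Int) Int) (vdir : PySem.Dict ((Int × Int) × (Int × Int)) Int)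
    (cnt : Int) (verts : PySem.Set (Int × Int)) (edges : PySem.Set ((Int × Int) × (Int × Int))),
    cur ∈ verts →
    (∀ p, vis.getD p 0 = if p ∈ verts then 1 else 0) →
    (∀ a b, vdir.getD (a, b) 0 = if pvCanon a b ∈ edges then 1 else 0) →
    (∀ e ∈ edges, e.1 ∈ verts ∧ e.2 ∈ verts) →
    cnt = (edges.length : Int) - (verts.length : Int) + 1 →
    (ps.foldl pvWalkStep (cur, vis, vdir, cnt)).2.2.2
      = ((ps.foldl pvStepV (cur, verts, edges)).2.2.length : Int)
        - ((ps.foldl pvStepV (cur, verts, edges)).2.1.length : Int) + 1 := by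
  intro ps
  induction ps with
  | nil =>
    intro cur vis vdir cnt verts edges hcur hvis hdir hends hcnt
    simpa using hcnt
  | cons p ps ih =>
    intro cur vis vdir cnt verts edges hcur hvis hdir hends hcnt
    rw [List.foldl_cons, List.foldl_cons]
    have hstepB : pvStepV (cur, verts, edges) p
        = (p, PySem.Set.add verts p, PySem.Set.add edges (pvCanon cur p)) := rfl
    rw [hstepB]
    by_cases hp : p ∈ verts
    · have hv1 : vis.getD p 0 = 1 := by rw [hvis]; simp [hp]
      have hverts' : PySem.Set.add verts p = verts := PySem.Set.add_of_mem hp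
      by_cases he : pvCanon cur p ∈ edges
      · -- old vertex over an old edge: cnt unchanged, both sets unchanged
        have hedges' : PySem.Set.add edges (pvCanon cur p) = edges := PySem.Set.add_of_mem he
        have hd : vdir.getD (cur, p) 0 = 1 := by rw [hdir]; simp [he]
        have hstepA : pvWalkStep (cur, vis, vdir, cnt)
            p = (p, vis, (vdir.insert (cur, p) 1).insert (p, cur) 1, cnt) := by
          simp [pvWalkStep, hv1, hd]
        rw [hstepA, hverts', hedges']
        refine ih p vis _ cnt verts edges hp hvis ?_ hends hcnt
        intro a b
        rw [pvDirInv vdir edges cur p hdir a b, hedges']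
      · -- old vertex over a NEW edge: A counts a room, B gains one edge
        have hedges' : PySem.Set.add edges (pvCanon cur p) = edges ++ [pvCanon cur p] :=
          PySem.Set.add_of_not_mem he
        have hd : vdir.getD (cur, p) 0 = 0 := by rw [hdir]; simp [he]
        have hstepA : pvWalkStep (cur, vis, vdir, cnt)
            p = (p, vis, (vdir.insert (cur, p) 1).insert (p, cur) 1, cnt + 1) := by
          simp [pvWalkStep, hv1, hd]
        rw [hstepA, hverts']
        refine ih p vis _ (cnt + 1) verts (PySem.Set.add edges (pvCanon cur p)) hp hvis
          (pvDirInv vdir edges cur p hdir) ?_ ?_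
        · intro e he'
          have hh := pvEndsInv edges verts cur p hcur hends e he'
          rwa [hverts'] at hh
        rw [hedges']
        simp only [List.length_append, List.length_cons, List.length_nil]
        push_cast
        omega
    · -- NEW vertex: the edge is necessarily new too; cnt unchanged, both sets grow by one
      have hv0 : vis.getD p 0 = 0 := by rw [hvis]; simp [hp]
      have he : pvCanon cur p ∉ edges := by
        intro hmem
        rcases pvCanon_cases cur p with h | h
        · exact hp ((by rw [h] at hmem; exact (hends _ hmem).2 : p ∈ verts))
        · exact hp ((by rw [h] at hmem; exact (hends _ hmem).1 : p ∈ verts))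
      have hverts' : PySem.Set.add verts p = verts ++ [p] := PySem.Set.add_of_not_mem hp
      have hedges' : PySem.Set.add edges (pvCanon cur p) = edges ++ [pvCanon cur p] :=
        PySem.Set.add_of_not_mem he
      have hstepA : pvWalkStep (cur, vis, vdir, cnt)
          p = (p, vis.insert p 1, (vdir.insert (cur, p) 1).insert (p, cur) 1, cnt) := by
        simp [pvWalkStep, hv0]
      rw [hstepA]
      refine ih p (vis.insert p 1) _ cnt (PySem.Set.add verts p)
        (PySem.Set.add edges (pvCanon cur p))
        ((PySem.Set.mem_add _ _ _).2 (Or.inr rfl)) ?_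
        (pvDirInv vdir edges cur p hdir)
        (pvEndsInv edges verts cur p hcur hends) ?_
      · intro q
        rw [PySem.Dict.getD_insert]
        by_cases hq : q = p
        · simp [hq, PySem.Set.mem_add]
        · rw [if_neg hq, hvis q]
          simp [PySem.Set.mem_add, hq]
      · rw [hverts', hedges']
        simp only [List.length_append, List.length_cons, List.length_nil]
        push_cast
        omega
-- ===== VERDICT (by name: the statement is the Claim_ definition above) =====
theorem solution_spec : Claim_equal_solution := by
  unfold Claim_equal_solution
  intro arrows _ _
  unfold Spec_solution solution solution_alt
  rw [pvBuild_eq, pvAlt_eq]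
  have hof : PySem.Set.ofList [((0 : Int), (0 : Int))] = [((0 : Int), (0 : Int))] := by decide
  simp only [List.singleton_append, hof]
  refine pvWalk_eq (pvPath ((0 : Int), (0 : Int)) arrows) ((0 : Int), (0 : Int)) _ _ 0
    [((0 : Int), (0 : Int))] [] (by simp) ?_ ?_ (by simp) (by simp)
  · intro p
    rw [PySem.Dict.getD_insert]
    by_cases hq : p = ((0 : Int), (0 : Int)) <;> simp [hq]
  · intro a b
    simp
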